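-- pv_equiv track=rewrite | github.com/mattm55/genmon | genmon.py | GetNumBitsChanged
-- ===== SOURCE A (Python) =====
-- def GetNumBitsChanged(FromValue, ToValue):
--
--     MaskBitsChanged = int(FromValue, 16) ^ int(ToValue, 16)
--     NumBitsChanged = MaskBitsChanged
--     count = 0
--     while (NumBitsChanged):
--         count += NumBitsChanged & 1
--         NumBitsChanged >>= 1
--
--     return count, MaskBitsChanged
-- ===== SOURCE B (Python) =====
-- def GetNumBitsChanged(FromValue, ToValue):
--     # Same mask; bits counted with Kernighan's trick (one iteration per SET bit,
--     # clearing the lowest set bit each time) instead of one per bit position.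
--     MaskBitsChanged = int(FromValue, 16) ^ int(ToValue, 16)
--     count = 0
--     n = MaskBitsChanged
--     while n:
--         n &= n - 1
--         count += 1
--     return count, MaskBitsChanged
-- ===== Notes on version B (the rewrite author's own statement) =====
-- stated objective: alternative
-- what changed: Bits are counted with Kernighan's n &= n-1 loop, which iterates once per set bit and clears the lowest set bit each step, instead of A's shift-and-test loop over every bit position.
import Mathlib
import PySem

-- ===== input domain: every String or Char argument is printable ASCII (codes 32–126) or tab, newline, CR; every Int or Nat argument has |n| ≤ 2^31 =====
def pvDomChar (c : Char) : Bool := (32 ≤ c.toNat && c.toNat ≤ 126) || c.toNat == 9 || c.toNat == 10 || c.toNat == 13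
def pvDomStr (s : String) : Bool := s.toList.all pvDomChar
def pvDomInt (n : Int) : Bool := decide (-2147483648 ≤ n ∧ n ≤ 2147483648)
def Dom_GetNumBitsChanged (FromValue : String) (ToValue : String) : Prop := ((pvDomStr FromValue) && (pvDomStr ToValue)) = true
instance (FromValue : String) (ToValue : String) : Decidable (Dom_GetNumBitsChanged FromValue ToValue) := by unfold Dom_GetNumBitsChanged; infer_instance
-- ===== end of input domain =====

-- B counts the set bits of the XOR mask with Kernighan's n &= n-1 loop (one step per set
-- bit, clearing the lowest set bit) instead of A's shift-and-test loop over bit positions.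


-- ===== PORT A =====
-- Python's `while NumBitsChanged: count += NumBitsChanged & 1; NumBitsChanged >>= 1`.
-- It terminates only for a nonnegative mask (guaranteed by Pre_); the port iterates on
-- mask.toNat, which is exact there.
def pvShiftCount (n : Nat) (count : Int) : Int :=
  if n = 0 then count else pvShiftCount (n >>> 1) (count + ((n &&& 1 : Nat) : Int))
decreasing_by simp [Nat.shiftRight_one]; omega

def GetNumBitsChanged (FromValue : String) (ToValue : String) : Int × Int :=
  match PySem.Int.ofStrBase? FromValue 16, PySem.Int.ofStrBase? ToValue 16 with
  | some a, some b =>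
      let mask := PySem.Int.bxor a b
      (pvShiftCount mask.toNat 0, mask)
  | _, _ => (0, 0)   -- int(_, 16) raised ValueError: outside Pre_

-- ===== PORT B =====
-- Python's `while n: n &= n - 1; count += 1` (Source B), same totalization via mask.toNat.
def pvKernighan (n : Nat) (count : Int) : Int :=
  if n = 0 then count else pvKernighan (n &&& (n - 1)) (count + 1)
decreasing_by exact Nat.lt_of_le_of_lt Nat.and_le_right (by omega)

def GetNumBitsChanged_alt (FromValue : String) (ToValue : String) : Int × Int :=
  match PySem.Int.ofStrBase? FromValue 16 with
  | none => (0, 0)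
  | some a =>
    match PySem.Int.ofStrBase? ToValue 16 with
    | none => (0, 0)
    | some b =>
      let mask := PySem.Int.bxor a b
      (pvKernighan mask.toNat 0, mask)

-- ===== PRECONDITION & SPEC =====
-- Pre_ admits exactly the inputs on which Python A returns: both strings parse as base-16
-- integers (else int() raises ValueError) and their XOR is nonnegative (on a negative mask
-- A's `>>= 1` loop never reaches 0, so A diverges; B's `n &= n-1` loop diverges there too).
def Pre_GetNumBitsChanged (FromValue : String) (ToValue : String) : Prop :=
  (PySem.Int.ofStrBase? FromValue 16).isSome ∧ (PySem.Int.ofStrBase? ToValue 16).isSome ∧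
    0 ≤ PySem.Int.bxor ((PySem.Int.ofStrBase? FromValue 16).getD 0)
        ((PySem.Int.ofStrBase? ToValue 16).getD 0)
instance (FromValue : String) (ToValue : String) : Decidable (Pre_GetNumBitsChanged FromValue ToValue) := by
  unfold Pre_GetNumBitsChanged; infer_instance

def pvWitness_GetNumBitsChanged : String × String := ("ff", "0x1A")

def Spec_GetNumBitsChanged (FromValue : String) (ToValue : String) (out : Int × Int) : Prop := out = GetNumBitsChanged_alt FromValue ToValue
instance (FromValue : String) (ToValue : String) (out : Int × Int) : Decidable (Spec_GetNumBitsChanged FromValue ToValue out) := by unfold Spec_GetNumBitsChanged; infer_instance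

-- ===== CLAIM (what is proved, stated in full; the proofs are below) =====
def Claim_equal_GetNumBitsChanged : Prop := ∀ (FromValue : String) (ToValue : String), Dom_GetNumBitsChanged FromValue ToValue → Pre_GetNumBitsChanged FromValue ToValue → Spec_GetNumBitsChanged FromValue ToValue (GetNumBitsChanged FromValue ToValue)

-- ===== LEMMAS AND PROOFS =====
theorem shift_succ (n : Nat) (c : Int) (h : n ≠ 0) :
    pvShiftCount n c = pvShiftCount (n / 2) (c + (n % 2 : Nat)) := by
  rw [pvShiftCount]; simp [h, Nat.shiftRight_one, Nat.and_one_is_mod]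

theorem and_pred_odd (k : Nat) : (2*k+1) &&& (2*k) = 2*k := by
  apply Nat.eq_of_testBit_eq; intro i
  simp only [Nat.testBit_and]
  rcases i with _ | i
  · simp [Nat.testBit_zero]
  · simp [Nat.testBit_succ, Nat.mul_add_div]

theorem and_pred_even (k : Nat) (hk : 0 < k) : (2*k) &&& (2*k-1) = 2*(k &&& (k-1)) := by
  apply Nat.eq_of_testBit_eq; intro i
  simp only [Nat.testBit_and]
  have h1 : 2*k-1 = 2*(k-1)+1 := by omega
  rcases i with _ | i
  · simp [Nat.testBit_zero]
  · rw [h1]; simp [Nat.testBit_succ, Nat.testBit_and, Nat.mul_add_div]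

-- doubling a number adds only a zero bit: neither loop's count changes
theorem shift_double (n : Nat) (c : Int) : pvShiftCount (2*n) c = pvShiftCount n c := by
  by_cases h : n = 0
  · simp [h]
  · rw [shift_succ (2*n) c (by omega)]
    simp [Nat.mul_mod_right]

theorem kern_double (n : Nat) (c : Int) : pvKernighan (2*n) c = pvKernighan n c := by
  induction n using Nat.strong_induction_on generalizing c with
  | _ n ih =>
    by_cases h : n = 0
    · simp [h]
    · rw [pvKernighan, if_neg (by omega : ¬ 2*n = 0), and_pred_even n (by omega),
          ih (n &&& (n-1)) (Nat.lt_of_le_of_lt Nat.and_le_right (by omega))]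
      conv_rhs => rw [pvKernighan, if_neg h]

theorem kern_eq_shift (n : Nat) (c : Int) : pvKernighan n c = pvShiftCount n c := by
  induction n using Nat.strong_induction_on generalizing c with
  | _ n ih =>
    by_cases h : n = 0
    · simp [h, pvKernighan, pvShiftCount]
    · rcases Nat.even_or_odd n with ⟨k, hk⟩ | ⟨k, hk⟩
      · subst hk
        rw [show k + k = 2*k by ring] at *
        rw [kern_double, shift_double]
        exact ih k (by omega) c
      · subst hk
        rw [pvKernighan, if_neg (by omega : ¬ 2*k+1 = 0),
            show 2*k+1-1 = 2*k by omega, and_pred_odd,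
            kern_double, shift_succ (2*k+1) c (by omega)]
        rw [show (2*k+1)/2 = k by omega, show (2*k+1)%2 = 1 by omega]
        exact ih k (by omega) (c+1)

-- ===== VERDICT (by name: the statement is the Claim_ definition above) =====
theorem GetNumBitsChanged_spec : Claim_equal_GetNumBitsChanged := by
  intro F T _ hPre
  unfold Spec_GetNumBitsChanged GetNumBitsChanged GetNumBitsChanged_alt
  obtain ⟨hF, hT, _⟩ := hPre
  obtain ⟨a, ha⟩ := Option.isSome_iff_exists.mp hF
  obtain ⟨b, hb⟩ := Option.isSome_iff_exists.mp hT
  rw [ha, hb]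
  simp [kern_eq_shift]
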